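-- pv_equiv track=rewrite | github.com/smileformylove/frame_glasses | examples/command_summary.py | summarize_pytest_output
-- ===== SOURCE A (Python) =====
-- from typing import Literal
--
-- Locale = Literal['en', 'zh']
--
-- def clean_text(text: str) -> str:
--     return " ".join(text.strip().split())
--
-- def is_dry_run(text: str) -> bool:
--     return clean_text(text).startswith("DRY RUN:")
--
-- def summarize_pytest_output(output: str, return_code: int, locale: Locale = 'en') -> str:
--     if is_dry_run(output):
--         return clean_text(output)
--     text = clean_text(output)
--     line = next((line.strip() for line in output.splitlines() if "failed" in line.lower() and "passed" in line.lower()), None)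
--     if line:
--         return clean_text(line) if locale == 'en' else clean_text(line.replace('failed', '失败').replace('passed', '通过').replace('warnings', '警告'))
--     failed_case = next((line.strip() for line in output.splitlines() if line.startswith("FAILED ")), None)
--     if failed_case:
--         return clean_text(failed_case) if locale == 'en' else f"测试失败：{clean_text(failed_case[7:])}"
--     passed_case = next((line.strip() for line in output.splitlines() if "passed" in line.lower()), None)
--     if passed_case:
--         return clean_text(passed_case) if locale == 'en' else clean_text(passed_case.replace('passed', '通过'))
--     if return_code == 0:
--         return 'tests passed' if locale == 'en' else '测试通过'
--     return clean_text(text[:160] or (f'tests failed ({return_code})' if locale == 'en' else f'测试失败（{return_code}）'))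
-- ===== SOURCE B (Python) =====
-- def clean_text(text: str) -> str:
--     return " ".join(text.strip().split())
--
-- def is_dry_run(text: str) -> bool:
--     return clean_text(text).startswith("DRY RUN:")
--
-- def _rank(line: str):
--     # classify a line: 0 = combo, 1 = FAILED-case, 2 = passed-case, None = irrelevant
--     low = line.lower()
--     if "failed" in low and "passed" in low:
--         return 0
--     if line.startswith("FAILED "):
--         return 1
--     if "passed" in low:
--         return 2
--     return None
--
-- def _format(rank: int, line: str, locale: str) -> str:
--     if locale == 'en':
--         return clean_text(line)
--     if rank == 0:
--         return clean_text(line.replace('failed', '失败').replace('passed', '通过').replace('warnings', '警告'))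
--     if rank == 1:
--         return f"测试失败：{clean_text(line[7:])}"
--     return clean_text(line.replace('passed', '通过'))
--
-- def _fallback(output: str, return_code: int, locale: str) -> str:
--     if return_code == 0:
--         return 'tests passed' if locale == 'en' else '测试通过'
--     text = clean_text(output)
--     return clean_text(text[:160] or (f'tests failed ({return_code})' if locale == 'en' else f'测试失败（{return_code}）'))
--
-- def summarize_pytest_output(output: str, return_code: int, locale: str = 'en') -> str:
--     if is_dry_run(output):
--         return clean_text(output)
--     # single pass: keep the best-ranked line, earliest on ties (0 beats 1 beats 2)
--     best = None
--     for line in output.splitlines():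
--         r = _rank(line)
--         if r is not None and (best is None or r < best[0]):
--             best = (r, line.strip())
--     if best is not None:
--         return _format(best[0], best[1], locale)
--     return _fallback(output, return_code, locale)
-- ===== Notes on version B (the rewrite author's own statement) =====
-- stated objective: alternative
-- what changed: Replaces A's three separate next(...) scans over output.splitlines() with a single pass keeping one best (rank, line) pair — rank 0 combo, 1 FAILED, 2 passed, earliest line wins ties — then a rank-driven formatter and a fallback helper.
import Mathlib
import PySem

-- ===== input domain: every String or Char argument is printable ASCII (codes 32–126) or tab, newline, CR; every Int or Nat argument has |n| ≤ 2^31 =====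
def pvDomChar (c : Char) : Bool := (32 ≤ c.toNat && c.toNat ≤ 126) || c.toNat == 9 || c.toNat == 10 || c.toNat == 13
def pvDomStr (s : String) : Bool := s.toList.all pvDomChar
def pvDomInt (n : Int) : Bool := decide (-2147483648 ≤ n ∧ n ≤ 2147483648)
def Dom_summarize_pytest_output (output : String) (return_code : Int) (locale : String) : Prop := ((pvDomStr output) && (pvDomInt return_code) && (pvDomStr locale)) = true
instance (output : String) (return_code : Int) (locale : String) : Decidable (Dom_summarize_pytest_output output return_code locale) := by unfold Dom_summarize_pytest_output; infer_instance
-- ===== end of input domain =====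

-- B replaces A's three separate next(...) scans with a single pass keeping one best (rank, line) pair
-- (rank 0 combo / 1 FAILED / 2 passed, earliest wins ties) plus a rank-driven formatter (objective: alternative decomposition).


-- shared module helpers (identical source in Source A and Source B)
def pvCleanText (text : String) : String :=
  PySem.Str.join " " (PySem.Str.split₀ (PySem.Str.strip text))

def pvIsDryRun (text : String) : Bool :=
  PySem.Str.startswith (pvCleanText text) "DRY RUN:"

-- ===== PORT A =====
def pvComboP (l : String) : Bool :=
  PySem.Str.isIn "failed" (PySem.Str.lower l) && PySem.Str.isIn "passed" (PySem.Str.lower l)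
def pvFailedP (l : String) : Bool := PySem.Str.startswith l "FAILED "
def pvPassedP (l : String) : Bool := PySem.Str.isIn "passed" (PySem.Str.lower l)

def summarize_pytest_output (output : String) (return_code : Int) (locale : String) : String :=
  if pvIsDryRun output then pvCleanText output
  else
    let text := pvCleanText output
    match ((PySem.Str.splitlines output).find? pvComboP).map PySem.Str.strip with
    | some line =>
        if locale = "en" then pvCleanText line
        else pvCleanText (PySem.Str.replace (PySem.Str.replace (PySem.Str.replace line "failed" "失败") "passed" "通过") "warnings" "警告")
    | none =>
      match ((PySem.Str.splitlines output).find? pvFailedP).map PySem.Str.strip with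
      | some failed_case =>
          if locale = "en" then pvCleanText failed_case
          else "测试失败：" ++ pvCleanText (PySem.Str.slice failed_case (some 7) none)
      | none =>
        match ((PySem.Str.splitlines output).find? pvPassedP).map PySem.Str.strip with
        | some passed_case =>
            if locale = "en" then pvCleanText passed_case
            else pvCleanText (PySem.Str.replace passed_case "passed" "通过")
        | none =>
          if return_code = 0 then (if locale = "en" then "tests passed" else "测试通过")
          else
            let t := PySem.Str.slice text none (some 160)
            pvCleanText (if t = "" then
                (if locale = "en" then "tests failed (" ++ PySem.Int.toStr return_code ++ ")"
                 else "测试失败（" ++ PySem.Int.toStr return_code ++ "）")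
              else t)

-- ===== PORT B =====
-- classify a line: 0 = combo, 1 = FAILED-case, 2 = passed-case, none = irrelevant
def pvRank? (line : String) : Option Nat :=
  if PySem.Str.isIn "failed" (PySem.Str.lower line) && PySem.Str.isIn "passed" (PySem.Str.lower line) then some 0
  else if PySem.Str.startswith line "FAILED " then some 1
  else if PySem.Str.isIn "passed" (PySem.Str.lower line) then some 2
  else none

-- keep the best-ranked line, earliest on ties
def pvBestStep (best : Option (Nat × String)) (line : String) : Option (Nat × String) :=
  match pvRank? line with
  | none => best
  | some r =>
    match best with
    | none => some (r, PySem.Str.strip line)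
    | some (rb, lb) => if r < rb then some (r, PySem.Str.strip line) else some (rb, lb)

def pvFormat (rank : Nat) (line : String) (locale : String) : String :=
  if locale = "en" then pvCleanText line
  else if rank = 0 then
    pvCleanText (PySem.Str.replace (PySem.Str.replace (PySem.Str.replace line "failed" "失败") "passed" "通过") "warnings" "警告")
  else if rank = 1 then
    "测试失败：" ++ pvCleanText (PySem.Str.slice line (some 7) none)
  else pvCleanText (PySem.Str.replace line "passed" "通过")

def pvFallback (output : String) (return_code : Int) (locale : String) : String :=
  if return_code = 0 then (if locale = "en" then "tests passed" else "测试通过")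
  else
    let text := pvCleanText output
    let t := PySem.Str.slice text none (some 160)
    pvCleanText (if t = "" then
        (if locale = "en" then "tests failed (" ++ PySem.Int.toStr return_code ++ ")"
         else "测试失败（" ++ PySem.Int.toStr return_code ++ "）")
      else t)

def summarize_pytest_output_alt (output : String) (return_code : Int) (locale : String) : String :=
  if pvIsDryRun output then pvCleanText output
  else
    match (PySem.Str.splitlines output).foldl pvBestStep none with
    | some (r, l) => pvFormat r l locale
    | none => pvFallback output return_code locale

-- ===== PRECONDITION & SPEC =====
def Spec_summarize_pytest_output (output : String) (return_code : Int) (locale : String) (out : String) : Prop := out = summarize_pytest_output_alt output return_code locale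
instance (output : String) (return_code : Int) (locale : String) (out : String) : Decidable (Spec_summarize_pytest_output output return_code locale out) := by unfold Spec_summarize_pytest_output; infer_instance

-- ===== CLAIM (what is proved, stated in full; the proofs are below) =====
def Claim_equal_summarize_pytest_output : Prop := ∀ (output : String) (return_code : Int) (locale : String), Dom_summarize_pytest_output output return_code locale → Spec_summarize_pytest_output output return_code locale (summarize_pytest_output output return_code locale)

-- ===== LEMMAS AND PROOFS =====

-- proof-side helpers: A's cascade of finds as one ranked value, and the "best" merge
def pvPure (lines : List String) : Option (Nat × String) :=
  match (lines.find? pvComboP).map PySem.Str.strip with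
  | some l => some (0, l)
  | none =>
    match (lines.find? pvFailedP).map PySem.Str.strip with
    | some l => some (1, l)
    | none =>
      match (lines.find? pvPassedP).map PySem.Str.strip with
      | some l => some (2, l)
      | none => none

def pvCombine (b p : Option (Nat × String)) : Option (Nat × String) :=
  match p with
  | none => b
  | some (rp, lp) =>
    match b with
    | none => some (rp, lp)
    | some (rb, lb) => if rp < rb then some (rp, lp) else some (rb, lb)

theorem pvRank?_eq (line : String) :
    pvRank? line = if pvComboP line then some 0 else if pvFailedP line then some 1
                   else if pvPassedP line then some 2 else none := rfl

theorem pvStep_eq_combine (b : Option (Nat × String)) (line : String) :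
    pvBestStep b line = pvCombine b ((pvRank? line).map (fun r => (r, PySem.Str.strip line))) := by
  unfold pvBestStep pvCombine
  cases pvRank? line <;> cases b <;> simp

theorem pvCombine_assoc (a b c : Option (Nat × String)) :
    pvCombine (pvCombine a b) c = pvCombine a (pvCombine b c) := by
  rcases a with _ | ⟨ra, la⟩ <;> rcases b with _ | ⟨rb, lb⟩ <;> rcases c with _ | ⟨rc, lc⟩
  case some.some.some =>
    by_cases h1 : rb < ra <;> by_cases h2 : rc < rb <;>
      simp only [pvCombine, h1, h2, if_pos, if_neg, not_false_iff] <;>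
        split_ifs <;> first | rfl | omega
  all_goals try rfl
  all_goals simp only [pvCombine.eq_def]
  all_goals repeat' split
  all_goals first | rfl | omega

theorem pvPure_cons (hd : String) (tl : List String) :
    pvPure (hd :: tl) =
      pvCombine ((pvRank? hd).map (fun r => (r, PySem.Str.strip hd))) (pvPure tl) := by
  unfold pvPure
  rw [pvRank?_eq]
  cases h1 : pvComboP hd <;> cases h2 : pvFailedP hd <;> cases h3 : pvPassedP hd <;>
    simp only [List.find?_cons, h1, h2, h3, if_true, if_false,
      Bool.false_eq_true, Option.map_some, Option.map_none] <;>
    rcases hc : List.find? pvComboP tl with _ | l1 <;>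
      rcases hf : List.find? pvFailedP tl with _ | l2 <;>
        rcases hp : List.find? pvPassedP tl with _ | l3 <;>
          simp [pvCombine]

theorem pvFoldl_best (lines : List String) (b : Option (Nat × String)) :
    lines.foldl pvBestStep b = pvCombine b (pvPure lines) := by
  induction lines generalizing b with
  | nil => simp [pvPure, pvCombine]
  | cons hd tl ih =>
    rw [List.foldl_cons, ih, pvStep_eq_combine, pvCombine_assoc, ← pvPure_cons]

-- ===== VERDICT (by name: the statement is the Claim_ definition above) =====
theorem summarize_pytest_output_spec : Claim_equal_summarize_pytest_output := by
  intro output return_code locale _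
  unfold Spec_summarize_pytest_output summarize_pytest_output summarize_pytest_output_alt
  rw [pvFoldl_best]
  unfold pvPure pvCombine pvFormat pvFallback
  rcases hc : ((PySem.Str.splitlines output).find? pvComboP).map PySem.Str.strip with _ | l1 <;>
    rcases hf : ((PySem.Str.splitlines output).find? pvFailedP).map PySem.Str.strip with _ | l2 <;>
      rcases hp : ((PySem.Str.splitlines output).find? pvPassedP).map PySem.Str.strip with _ | l3 <;>
        simp
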